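-- pv_equiv track=rewrite | github.com/hua123an/ccb-py | src/ccb/display.py | _apply_left_border
-- ===== SOURCE A (Python) =====
-- def _apply_left_border(
--     frags: list[tuple[str, str]],
--     border_style: str,
--     border_char: str = "  ┃ ",
-- ) -> list[tuple[str, str]]:
--     """Wrap fragments with a left-border prefix that fires ONCE per actual line.
--
--     Naive per-fragment wrapping breaks inline formatting (e.g. `code` inside
--     a paragraph) onto its own line with a new border. This groups fragments
--     by the newlines that actually exist in their text, preserving inline
--     flow while still drawing the border continuously on every line (blank
--     included, matching Ink's borderLeft behavior).
--     """
--     result: list[tuple[str, str]] = []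
--     current: list[tuple[str, str]] = []
--     for style, text in frags:
--         if not text:
--             continue
--         parts = text.split("\n")
--         for i, part in enumerate(parts):
--             if part:
--                 current.append((style, part))
--             if i < len(parts) - 1:
--                 # End of a line — emit border + accumulated content + newline
--                 result.append((border_style, border_char))
--                 result.extend(current)
--                 result.append(("", "\n"))
--                 current = []
--     # Flush trailing partial line (no terminating \n in original)
--     if current:
--         result.append((border_style, border_char))
--         result.extend(current)
--         result.append(("", "\n"))
--     return result
-- ===== SOURCE B (Python) =====
-- def _apply_left_border(
--     frags: list[tuple[str, str]],
--     border_style: str,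
--     border_char: str = "  \u2503 ",
-- ) -> list[tuple[str, str]]:
--     # Pass 1: group fragments into lines (each line is a list of (style, part)).
--     lines: list[list[tuple[str, str]]] = []
--     cur: list[tuple[str, str]] = []
--     for style, text in frags:
--         if not text:
--             continue
--         parts = text.split("\n")
--         if parts[0]:
--             cur.append((style, parts[0]))
--         for part in parts[1:]:
--             lines.append(cur)  # a newline closes the current line (blank kept)
--             cur = [(style, part)] if part else []
--     if cur:
--         lines.append(cur)  # trailing partial line only when non-empty
--     # Pass 2: render every line with the border prefix and a newline.
--     out: list[tuple[str, str]] = []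
--     for line in lines:
--         out.append((border_style, border_char))
--         out.extend(line)
--         out.append(("", "\n"))
--     return out
-- ===== Notes on version B (the rewrite author's own statement) =====
-- stated objective: alternative
-- what changed: Replaces A's single interleaved accumulate-and-emit loop (index-based newline test, flush duplicated after the loop) by two passes: first group fragments into a list of lines, then render each line with border prefix and newline in one uniform loop.
import Mathlib
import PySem

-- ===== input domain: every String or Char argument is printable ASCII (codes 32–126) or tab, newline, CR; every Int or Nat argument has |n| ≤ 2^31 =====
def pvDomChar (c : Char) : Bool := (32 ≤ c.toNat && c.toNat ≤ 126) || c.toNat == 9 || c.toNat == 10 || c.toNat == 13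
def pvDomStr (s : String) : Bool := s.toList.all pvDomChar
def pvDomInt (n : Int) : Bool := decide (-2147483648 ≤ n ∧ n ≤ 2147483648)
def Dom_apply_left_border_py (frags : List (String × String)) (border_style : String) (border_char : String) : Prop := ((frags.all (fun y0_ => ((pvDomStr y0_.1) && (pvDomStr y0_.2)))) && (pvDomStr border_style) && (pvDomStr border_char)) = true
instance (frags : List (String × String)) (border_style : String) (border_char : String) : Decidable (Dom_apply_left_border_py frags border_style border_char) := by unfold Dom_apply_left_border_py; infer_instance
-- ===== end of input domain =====

-- B restructures A's single interleaved accumulate-and-emit loop into two passes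
-- (group fragments into lines, then render each line); return values are proved equal.

-- ===== PORT A =====
-- inner 'for i, part in enumerate(parts)' loop of A, carried state (result, current);
-- i is the current index, n = len(parts)
def albA_line (bs bc style : String) :
    List String → Nat → Nat →
    List (String × String) × List (String × String) →
    List (String × String) × List (String × String)
  | [], _, _, st => st
  | p :: rest, i, n, (res, cur) =>
    let cur' := if p ≠ "" then cur ++ [(style, p)] else cur
    if i < n - 1 then
      albA_line bs bc style rest (i+1) n (res ++ [(bs, bc)] ++ cur' ++ [("", "\n")], [])
    else
      albA_line bs bc style rest (i+1) n (res, cur')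

def apply_left_border_py (frags : List (String × String)) (border_style : String) (border_char : String) : List (String × String) :=
  let st := frags.foldl (fun st f =>
    if f.2 = "" then st
    else
      let parts := (PySem.Str.split? f.2 "\n").getD []
      albA_line border_style border_char f.1 parts 0 parts.length st) ([], [])
  if st.2 ≠ [] then st.1 ++ [(border_style, border_char)] ++ st.2 ++ [("", "\n")] else st.1

-- ===== PORT B =====
-- B's 'for part in parts[1:]' loop, carried state (lines, cur)
def albB_tail (style : String) :
    List String → List (List (String × String)) × List (String × String) →
    List (List (String × String)) × List (String × String)
  | [], st => st
  | p :: rest, (lines, cur) =>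
    albB_tail style rest (lines ++ [cur], if p ≠ "" then [(style, p)] else [])

def apply_left_border_py_alt (frags : List (String × String)) (border_style : String) (border_char : String) : List (String × String) :=
  -- pass 1: group into lines
  let st := frags.foldl (fun st f =>
    if f.2 = "" then st
    else
      match (PySem.Str.split? f.2 "\n").getD [] with
      | [] => st  -- unreachable: str.split never returns an empty list (guard for totality only)
      | p :: rest =>
        albB_tail f.1 rest (st.1, if p ≠ "" then st.2 ++ [(f.1, p)] else st.2)) ([], [])
  let lines := if st.2 ≠ [] then st.1 ++ [st.2] else st.1
  -- pass 2: render
  lines.foldl (fun out l => out ++ ([(border_style, border_char)] ++ l ++ [("", "\n")])) []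

-- ===== PRECONDITION & SPEC =====
def Spec_apply_left_border_py (frags : List (String × String)) (border_style : String) (border_char : String) (out : List (String × String)) : Prop := out = apply_left_border_py_alt frags border_style border_char
instance (frags : List (String × String)) (border_style : String) (border_char : String) (out : List (String × String)) : Decidable (Spec_apply_left_border_py frags border_style border_char out) := by unfold Spec_apply_left_border_py; infer_instance

-- ===== CLAIM (what is proved, stated in full; the proofs are below) =====
def Claim_equal_apply_left_border_py : Prop := ∀ (frags : List (String × String)) (border_style : String) (border_char : String), Dom_apply_left_border_py frags border_style border_char → Spec_apply_left_border_py frags border_style border_char (apply_left_border_py frags border_style border_char)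

-- ===== LEMMAS AND PROOFS =====

-- rendering of one line
def albG (bs bc : String) (l : List (String × String)) : List (String × String) :=
  (bs, bc) :: (l ++ [("", "\n")])

-- one-step unfolding of A's inner loop
theorem albA_line_cons (bs bc sty p : String) (rest : List String) (i n : Nat)
    (res cur : List (String × String)) :
    albA_line bs bc sty (p :: rest) i n (res, cur) =
      (if i < n - 1 then
        albA_line bs bc sty rest (i+1) n
          (res ++ [(bs, bc)] ++ (if p ≠ "" then cur ++ [(sty, p)] else cur) ++ [("", "\n")], [])
      else
        albA_line bs bc sty rest (i+1) n (res, if p ≠ "" then cur ++ [(sty, p)] else cur)) := rfl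

-- inner loops agree: A's indexed loop over parts at index i (with n = i + length)
-- equals B's head-then-tail treatment, under 'A-result = rendered B-lines'
theorem albA_line_eq (bs bc sty : String) :
    ∀ (r : List String) (i : Nat) (lines : List (List (String × String)))
      (cur : List (String × String)),
    albA_line bs bc sty r i (i + r.length) (lines.flatMap (albG bs bc), cur) =
      (let st :=
        match r with
        | [] => (lines, cur)
        | p :: rest => albB_tail sty rest (lines, if p ≠ "" then cur ++ [(sty, p)] else cur)
       (st.1.flatMap (albG bs bc), st.2)) := by
  intro r
  induction r with
  | nil => intro i lines cur; simp [albA_line]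
  | cons p rest ih =>
    intro i lines cur
    cases rest with
    | nil =>
      rw [albA_line_cons, if_neg (by simp)]
      simp [albA_line, albB_tail]
    | cons q rest' =>
      rw [albA_line_cons, if_pos (by simp)]
      have hflat : lines.flatMap (albG bs bc) ++ [(bs, bc)] ++
          (if p ≠ "" then cur ++ [(sty, p)] else cur) ++ [("", "\n")] =
          (lines ++ [if p ≠ "" then cur ++ [(sty, p)] else cur]).flatMap (albG bs bc) := by
        simp [albG]
      rw [hflat, show i + (p :: q :: rest').length = (i+1) + (q :: rest').length by
        simp; omega]
      rw [ih (i+1) (lines ++ [if p ≠ "" then cur ++ [(sty, p)] else cur]) []]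
      simp [albB_tail]

-- outer fold invariant: A's state is (rendered lines, cur) of B's state
theorem albFold_eq (bs bc : String) :
    ∀ (frags : List (String × String)) (lines : List (List (String × String)))
      (cur : List (String × String)),
    frags.foldl (fun st f =>
      if f.2 = "" then st
      else
        let parts := (PySem.Str.split? f.2 "\n").getD []
        albA_line bs bc f.1 parts 0 parts.length st) (lines.flatMap (albG bs bc), cur) =
    (let st := frags.foldl (fun st f =>
      if f.2 = "" then st
      else
        match (PySem.Str.split? f.2 "\n").getD [] with
        | [] => st
        | p :: rest =>
          albB_tail f.1 rest (st.1, if p ≠ "" then st.2 ++ [(f.1, p)] else st.2)) (lines, cur)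
     (st.1.flatMap (albG bs bc), st.2)) := by
  intro frags
  induction frags with
  | nil => intro lines cur; simp
  | cons f fs ih =>
    intro lines cur
    by_cases h : f.2 = ""
    · simp only [List.foldl_cons, h, ite_true]
      exact ih lines cur
    · simp only [List.foldl_cons, h, ite_false]
      have key := albA_line_eq bs bc f.1 ((PySem.Str.split? f.2 "\n").getD []) 0 lines cur
      simp only [Nat.zero_add] at key
      rw [key]
      cases hp : (PySem.Str.split? f.2 "\n").getD [] with
      | nil => exact ih lines cur
      | cons p rest =>
        simp only
        obtain ⟨l', c'⟩ := albB_tail f.1 rest (lines, if p ≠ "" then cur ++ [(f.1, p)] else cur)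
        exact ih l' c'

-- the flush + render steps agree for any final state
theorem albRender_eq (bs bc : String)
    (st : List (List (String × String)) × List (String × String)) :
    (if st.2 ≠ [] then st.1.flatMap (albG bs bc) ++ [(bs, bc)] ++ st.2 ++ [("", "\n")]
     else st.1.flatMap (albG bs bc)) =
    (if st.2 ≠ [] then st.1 ++ [st.2] else st.1).foldl
      (fun out l => out ++ ([(bs, bc)] ++ l ++ [("", "\n")])) [] := by
  by_cases h : st.2 = [] <;>
    simp [h, PySem.List.foldl_append_eq_flatMap, albG, List.flatMap_def] <;> rfl

theorem apply_left_border_eq (frags : List (String × String)) (bs bc : String) :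
    apply_left_border_py frags bs bc = apply_left_border_py_alt frags bs bc := by
  unfold apply_left_border_py apply_left_border_py_alt
  have h := albFold_eq bs bc frags [] []
  simp only [List.flatMap_nil] at h
  rw [h]
  exact albRender_eq bs bc _

-- ===== VERDICT (by name: the statement is the Claim_ definition above) =====
theorem apply_left_border_py_spec : Claim_equal_apply_left_border_py := by
  intro frags bs bc _
  unfold Spec_apply_left_border_py
  exact apply_left_border_eq frags bs bc
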